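-- pv_equiv track=rewrite | github.com/mglhbr/ethrc_hack_26 | iphone_gps_autopath/loggertest.py | lookup_field
-- ===== SOURCE A (Python) =====
-- def normalize_field_name(name):
--     if not isinstance(name, str):
--         return ""
--     return "".join(ch.lower() for ch in name if ch.isalnum())
--
-- def lookup_field(sample, names):
--     """Find a value by allowing header variants like units/spacing/parentheses."""
--     if sample is None:
--         return None
--
--     normalized_map = {normalize_field_name(k): v for k, v in sample.items()}
--     for candidate in names:
--         value = normalized_map.get(normalize_field_name(candidate))
--         if value is not None:
--             return value
--     return None
-- ===== SOURCE B (Python) =====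
-- def normalize_field_name(name):
--     if not isinstance(name, str):
--         return ""
--     return "".join(ch.lower() for ch in name if ch.isalnum())
--
-- def lookup_field(sample, names):
--     """Find a value by allowing header variants like units/spacing/parentheses."""
--     if sample is None:
--         return None
--     for candidate in names:
--         target = normalize_field_name(candidate)
--         found = None
--         for k, v in sample.items():
--             if normalize_field_name(k) == target:
--                 found = v
--         if found is not None:
--             return found
--     return None
-- ===== Notes on version B (the rewrite author's own statement) =====
-- stated objective: alternative
-- what changed: Replaces A's prebuilt normalized-key dict with a per-candidate backward-overwriting scan of the items (last matching key wins, mirroring dict last-write-wins), so no intermediate map is ever built.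
import Mathlib
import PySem

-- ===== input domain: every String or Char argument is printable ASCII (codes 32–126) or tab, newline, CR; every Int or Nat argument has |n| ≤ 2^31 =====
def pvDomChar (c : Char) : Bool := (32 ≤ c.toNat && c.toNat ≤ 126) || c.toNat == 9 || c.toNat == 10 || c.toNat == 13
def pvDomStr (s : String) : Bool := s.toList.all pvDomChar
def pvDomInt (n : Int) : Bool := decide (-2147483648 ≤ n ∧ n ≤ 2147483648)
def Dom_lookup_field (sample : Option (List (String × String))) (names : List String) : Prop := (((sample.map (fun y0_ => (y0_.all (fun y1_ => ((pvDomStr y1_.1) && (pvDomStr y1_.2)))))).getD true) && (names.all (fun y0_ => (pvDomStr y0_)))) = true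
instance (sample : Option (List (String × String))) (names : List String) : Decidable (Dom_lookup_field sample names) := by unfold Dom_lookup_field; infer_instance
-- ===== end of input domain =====

-- B replaces A's prebuilt normalized-key dict with a per-candidate last-match scan of the items
-- (same return value; alternative decomposition, no speed claim).

-- ===== PORT A =====
-- "".join(ch.lower() for ch in name if ch.isalnum())  (name is always a str here)
def normalize_field_name (name : String) : String :=
  String.ofList ((name.toList.filter PySem.Chars.isalnum).map PySem.Chars.lowerChar)

def lookA (m : PySem.Dict String String) : List String → Option String
  | [] => none
  | c :: rest =>
    match m.get? (normalize_field_name c) with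
    | some v => some v
    | none => lookA m rest

def lookup_field (sample : Option (List (String × String))) (names : List String) : Option String :=
  match sample with
  | none => none
  | some items =>
    let normalized_map := PySem.Dict.ofList (items.map (fun kv => (normalize_field_name kv.1, kv.2)))
    lookA normalized_map names

-- ===== PORT B =====
-- found = None; for k, v in sample.items(): if normalize_field_name(k) == target: found = v
def scanLast (items : List (String × String)) (target : String) : Option String :=
  items.foldl (fun found kv => if normalize_field_name kv.1 = target then some kv.2 else found) none

def lookB (items : List (String × String)) : List String → Option String
  | [] => none
  | c :: rest =>
    match scanLast items (normalize_field_name c) with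
    | some found => some found
    | none => lookB items rest

def lookup_field_alt (sample : Option (List (String × String))) (names : List String) : Option String :=
  match sample with
  | none => none
  | some items => lookB items names

-- ===== PRECONDITION & SPEC =====
def Spec_lookup_field (sample : Option (List (String × String))) (names : List String) (out : Option String) : Prop := out = lookup_field_alt sample names
instance (sample : Option (List (String × String))) (names : List String) (out : Option String) : Decidable (Spec_lookup_field sample names out) := by unfold Spec_lookup_field; infer_instance

-- ===== CLAIM (what is proved, stated in full; the proofs are below) =====
def Claim_equal_lookup_field : Prop := ∀ (sample : Option (List (String × String))) (names : List String), Dom_lookup_field sample names → Spec_lookup_field sample names (lookup_field sample names)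

-- ===== LEMMAS AND PROOFS =====

-- folding inserts into any dict: get? is the last match in the fold, seeded by the start dict's answer
theorem get?_foldl_insert (ps : List (String × String)) (d : PySem.Dict String String) (t : String) :
    (ps.foldl (fun d kv => d.insert kv.1 kv.2) d).get? t
      = ps.foldl (fun acc kv => if kv.1 = t then some kv.2 else acc) (d.get? t) := by
  induction ps generalizing d with
  | nil => rfl
  | cons p ps ih =>
    rw [List.foldl_cons, List.foldl_cons, ih, PySem.Dict.get?_insert]
    congr 1
    by_cases h : p.1 = t
    · rw [if_pos h, if_pos h.symm]
    · rw [if_neg h, if_neg (fun hh => h hh.symm)]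

theorem get?_ofList_eq_last_match (ps : List (String × String)) (t : String) :
    (PySem.Dict.ofList ps).get? t
      = ps.foldl (fun acc kv => if kv.1 = t then some kv.2 else acc) none := by
  have : PySem.Dict.ofList ps = ps.foldl (fun d kv => d.insert kv.1 kv.2) PySem.Dict.empty := by
    rfl
  rw [this, get?_foldl_insert]
  rfl

theorem get?_map_eq_scanLast (items : List (String × String)) (t : String) :
    (PySem.Dict.ofList (items.map (fun kv => (normalize_field_name kv.1, kv.2)))).get? t
      = scanLast items t := by
  rw [get?_ofList_eq_last_match]
  unfold scanLast
  rw [List.foldl_map]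

theorem lookA_eq_lookB (items : List (String × String)) (names : List String) :
    lookA (PySem.Dict.ofList (items.map (fun kv => (normalize_field_name kv.1, kv.2)))) names
      = lookB items names := by
  induction names with
  | nil => rfl
  | cons c rest ih =>
    simp only [lookA, lookB, get?_map_eq_scanLast, ih]

-- ===== VERDICT (by name: the statement is the Claim_ definition above) =====
theorem lookup_field_spec : Claim_equal_lookup_field := by
  intro sample names _
  unfold Spec_lookup_field lookup_field lookup_field_alt
  cases sample with
  | none => rfl
  | some items => exact lookA_eq_lookB items names
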